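-- pv_equiv track=rewrite | github.com/MrBrantCode/unitest_baseline | mut_generate/mist_train_cf/cf_99503/solution.py | sentence_type
-- ===== SOURCE A (Python) =====
-- def sentence_type(sentence):
--     vowels = "aeiou"
--     consonants = "bcdfghjklmnpqrstvwxyz"
--     num_vowels = sum(sentence.lower().count(v) for v in vowels)
--     num_consonants = sum(sentence.lower().count(c) for c in consonants)
--     if num_vowels > num_consonants:
--         return "affirmative"
--     elif num_vowels < num_consonants:
--         return "negative"
--     else:
--         return "neutral"
-- ===== SOURCE B (Python) =====
-- def sentence_type(sentence):
--     vowels = set("aeiou")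
--     consonants = set("bcdfghjklmnpqrstvwxyz")
--     num_vowels = 0
--     num_consonants = 0
--     for ch in sentence.lower():
--         if ch in vowels:
--             num_vowels += 1
--         elif ch in consonants:
--             num_consonants += 1
--     if num_vowels > num_consonants:
--         return "affirmative"
--     elif num_vowels < num_consonants:
--         return "negative"
--     else:
--         return "neutral"
-- ===== Notes on version B (the rewrite author's own statement) =====
-- stated objective: idiomatic
-- what changed: Replaces 26 full scans of the lowered sentence (one str.count per alphabet letter) with a single pass over its characters maintaining two counters via set membership.
import Mathlib
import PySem

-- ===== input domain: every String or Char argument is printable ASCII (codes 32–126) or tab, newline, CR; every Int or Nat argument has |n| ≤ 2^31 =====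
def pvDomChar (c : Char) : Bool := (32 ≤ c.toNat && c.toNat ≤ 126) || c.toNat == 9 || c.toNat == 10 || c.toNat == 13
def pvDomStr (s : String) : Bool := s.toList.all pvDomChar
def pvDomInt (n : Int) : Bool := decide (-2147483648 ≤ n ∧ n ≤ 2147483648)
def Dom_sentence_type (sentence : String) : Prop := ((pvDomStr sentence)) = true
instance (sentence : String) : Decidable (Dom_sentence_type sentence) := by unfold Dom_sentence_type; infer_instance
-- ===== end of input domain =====

-- B replaces A's 26 full scans of the lowered sentence with a single pass keeping two counters (objective: idiomatic).

-- ===== PORT A =====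
def sentence_type (sentence : String) : String :=
  let vowels := "aeiou"
  let consonants := "bcdfghjklmnpqrstvwxyz"
  let num_vowels : Int :=
    (vowels.toList.map (fun v => (PySem.Str.count (PySem.Str.lower sentence) (String.ofList [v]) : Int))).sum
  let num_consonants : Int :=
    (consonants.toList.map (fun c => (PySem.Str.count (PySem.Str.lower sentence) (String.ofList [c]) : Int))).sum
  if num_vowels > num_consonants then "affirmative"
  else if num_vowels < num_consonants then "negative"
  else "neutral"

-- ===== PORT B =====
def sentence_type_alt (sentence : String) : String :=
  let vowels : PySem.Set Char := PySem.Set.ofList "aeiou".toList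
  let consonants : PySem.Set Char := PySem.Set.ofList "bcdfghjklmnpqrstvwxyz".toList
  let counts : Int × Int :=
    (PySem.Str.lower sentence).toList.foldl
      (fun acc ch =>
        if ch ∈ vowels then (acc.1 + 1, acc.2)
        else if ch ∈ consonants then (acc.1, acc.2 + 1)
        else acc)
      (0, 0)
  if counts.1 > counts.2 then "affirmative"
  else if counts.1 < counts.2 then "negative"
  else "neutral"

-- ===== PRECONDITION & SPEC =====
def Spec_sentence_type (sentence : String) (out : String) : Prop := out = sentence_type_alt sentence
instance (sentence : String) (out : String) : Decidable (Spec_sentence_type sentence out) := by unfold Spec_sentence_type; infer_instance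

-- ===== CLAIM (what is proved, stated in full; the proofs are below) =====
def Claim_equal_sentence_type : Prop := ∀ (sentence : String), Dom_sentence_type sentence → Spec_sentence_type sentence (sentence_type sentence)

-- ===== LEMMAS AND PROOFS =====

-- Chars.count.go with a single-character needle counts occurrences of that character.
lemma count_go_single (c : Char) : ∀ (l : List Char) (fuel acc : Nat), l.length ≤ fuel →
    PySem.Chars.count.go [c] fuel l acc = acc + l.count c := by
  intro l
  induction l with
  | nil =>
    intro fuel acc _
    cases fuel <;> simp [PySem.Chars.count.go]
  | cons h t ih =>
    intro fuel acc hfuel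
    cases fuel with
    | zero => simp at hfuel
    | succ f =>
      rw [PySem.Chars.count.go]
      by_cases hc : c = h
      · subst hc
        simp only [List.isPrefixOf, List.length_singleton, List.drop_one, List.tail_cons,
          beq_self_eq_true, Bool.true_and, if_true]
        rw [ih f (acc + 1) (by simp only [List.length_cons] at hfuel; omega)]
        simp
        omega
      · have hp : ([c].isPrefixOf (h :: t)) = false := by
          simp [List.isPrefixOf]
          exact fun hh => hc (by simpa using hh)
        rw [hp, if_neg (by simp : ¬ (false = true))]
        rw [ih f acc (by simp only [List.length_cons] at hfuel; omega)]
        simp [Ne.symm hc]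

lemma count_single (ls : List Char) (c : Char) :
    PySem.Chars.count ls [c] = ls.count c := by
  rw [PySem.Chars.count]
  simp only [List.isEmpty_cons]
  rw [count_go_single c ls ls.length 0 (le_refl _)]
  simp

-- Summing per-letter counts over a duplicate-free list of letters equals one countP pass.
lemma sum_count_eq_countP (V : List Char) (hV : V.Nodup) (ls : List Char) :
    (V.map (fun v => (ls.count v : Int))).sum = (ls.countP (fun ch => decide (ch ∈ V)) : Int) := by
  induction ls with
  | nil => simp
  | cons c t ih =>
    have hsum : (V.map (fun v => (List.count v (c :: t) : Int))).sum
        = (V.map (fun v => (List.count v t : Int))).sum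
          + (V.map (fun v => if c = v then (1 : Int) else 0)).sum := by
      rw [← List.sum_map_add]
      apply congrArg List.sum
      apply List.map_congr_left
      intro v hv
      rcases eq_or_ne c v with h | h
      · simp [h]
      · simp [h]
    have hind : ∀ (W : List Char), W.Nodup →
        (W.map (fun v => if c = v then (1 : Int) else 0)).sum = if c ∈ W then 1 else 0 := by
      intro W hW
      induction W with
      | nil => simp
      | cons w tw ihw =>
        simp only [List.nodup_cons] at hW
        simp only [List.map_cons, List.sum_cons, ihw hW.2, List.mem_cons]
        by_cases hcw : c = w
        · subst hcw
          simp [hW.1]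
        · simp [hcw]
    rw [hsum, ih, hind V hV, List.countP_cons]
    by_cases hc : c ∈ V <;> simp [hc]

-- The single-pass fold computes (a + #vowels, b + #elif-consonants) as countP's.
lemma foldl_two_counters (V C : List Char) :
    ∀ (ls : List Char) (a b : Int),
    ls.foldl (fun acc ch =>
        if ch ∈ V then (acc.1 + 1, acc.2)
        else if ch ∈ C then (acc.1, acc.2 + 1)
        else acc) (a, b)
      = (a + (ls.countP (fun ch => decide (ch ∈ V)) : Int),
         b + (ls.countP (fun ch => !decide (ch ∈ V) && decide (ch ∈ C)) : Int)) := by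
  intro ls
  induction ls with
  | nil => simp
  | cons c t ih =>
    intro a b
    simp only [List.foldl_cons, List.countP_cons]
    by_cases h1 : c ∈ V
    · simp only [if_pos h1, ih]
      simp [h1]
      omega
    · by_cases h2 : c ∈ C
      · simp only [if_neg h1, if_pos h2, ih]
        simp [h1, h2]
        omega
      · simp only [if_neg h1, if_neg h2, ih]
        simp [h1, h2]

-- ===== VERDICT (by name: the statement is the Claim_ definition above) =====
theorem sentence_type_spec : Claim_equal_sentence_type := by
  intro sentence _
  unfold Spec_sentence_type sentence_type sentence_type_alt
  have hA : "aeiou".toList = ['a', 'e', 'i', 'o', 'u'] := by decide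
  have hB : "bcdfghjklmnpqrstvwxyz".toList = ['b', 'c', 'd', 'f', 'g', 'h', 'j', 'k', 'l', 'm', 'n', 'p', 'q', 'r', 's', 't', 'v', 'w', 'x', 'y', 'z'] := by decide
  have hV : PySem.Set.ofList ['a', 'e', 'i', 'o', 'u'] = ['a', 'e', 'i', 'o', 'u'] := by decide
  have hC : PySem.Set.ofList ['b', 'c', 'd', 'f', 'g', 'h', 'j', 'k', 'l', 'm', 'n', 'p', 'q', 'r', 's', 't', 'v', 'w', 'x', 'y', 'z'] = ['b', 'c', 'd', 'f', 'g', 'h', 'j', 'k', 'l', 'm', 'n', 'p', 'q', 'r', 's', 't', 'v', 'w', 'x', 'y', 'z'] := by decide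
  simp only [PySem.Str.count_eq, String.toList_ofList, count_single, hA, hB, hV, hC]
  rw [sum_count_eq_countP _ (by decide), sum_count_eq_countP _ (by decide), foldl_two_counters]
  have hdisj : ((PySem.Str.lower sentence).toList.countP (fun ch => !decide (ch ∈ ['a', 'e', 'i', 'o', 'u'])
        && decide (ch ∈ ['b', 'c', 'd', 'f', 'g', 'h', 'j', 'k', 'l', 'm', 'n', 'p', 'q', 'r', 's', 't', 'v', 'w', 'x', 'y', 'z'])))
      = ((PySem.Str.lower sentence).toList.countP (fun ch => decide (ch ∈ ['b', 'c', 'd', 'f', 'g', 'h', 'j', 'k', 'l', 'm', 'n', 'p', 'q', 'r', 's', 't', 'v', 'w', 'x', 'y', 'z']))) := by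
    apply List.countP_congr
    intro ch _
    by_cases hc : ch ∈ ['b', 'c', 'd', 'f', 'g', 'h', 'j', 'k', 'l', 'm', 'n', 'p', 'q', 'r', 's', 't', 'v', 'w', 'x', 'y', 'z']
    · have hnv : ch ∉ ['a', 'e', 'i', 'o', 'u'] := by
        have h2 : (['b', 'c', 'd', 'f', 'g', 'h', 'j', 'k', 'l', 'm', 'n', 'p', 'q', 'r', 's', 't', 'v', 'w', 'x', 'y', 'z'].all
            (fun x => !(['a', 'e', 'i', 'o', 'u'].contains x))) = true := by decide
        simpa using List.all_eq_true.mp h2 ch hc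
      simp [hc, hnv]
    · simp [hc]
  rw [hdisj]
  simp
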